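-- pv_equiv track=rewrite | github.com/Qusarber/python-lesson | final.py | max_missing_positive
-- ===== SOURCE A (Python) =====
-- def max_missing_positive(lst1):
-- 	rezlst = []
-- 	k=1
-- 	for i in range(max(lst1)):
-- 		if k in lst1:
-- 			k+=1
-- 		elif k not in lst1 and k>0 and k<max(lst1):
-- 			rezlst.append(k)
-- 			k+=1
-- 	if len(rezlst)==0:
-- 		rezlst.append(max(lst1)+1)
-- 	return max(rezlst)
-- ===== SOURCE B (Python) =====
-- def max_missing_positive(lst1):
--     m = max(lst1)
--     present = set(lst1)
--     for k in range(m - 1, 0, -1):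
--         if k not in present:
--             return k
--     return m + 1
-- ===== Notes on version B (the rewrite author's own statement) =====
-- stated objective: faster
-- what changed: Instead of accumulating every missing value in [1,max) into a list by a forward counter loop with repeated O(n) list-membership tests and taking the list's max, B builds a set once and scans k downward from max-1, returning the first missing k (or max+1 if none is missing).
-- outside the precondition, e.g. on max_missing_positive([]): A raises ValueError, B raises ValueError
import Mathlib
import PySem

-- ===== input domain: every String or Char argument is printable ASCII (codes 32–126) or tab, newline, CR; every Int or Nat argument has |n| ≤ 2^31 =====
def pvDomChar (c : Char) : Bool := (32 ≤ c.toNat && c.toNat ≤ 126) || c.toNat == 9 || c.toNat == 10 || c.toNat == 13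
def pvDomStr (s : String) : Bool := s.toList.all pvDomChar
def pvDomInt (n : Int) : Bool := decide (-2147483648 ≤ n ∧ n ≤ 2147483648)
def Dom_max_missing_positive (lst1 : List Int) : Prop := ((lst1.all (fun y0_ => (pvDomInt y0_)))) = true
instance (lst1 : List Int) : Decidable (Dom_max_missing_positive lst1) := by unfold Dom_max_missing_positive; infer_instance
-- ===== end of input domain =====

-- B replaces A's forward counter loop (which collects all missing values of [1, max) into a
-- list, testing membership in the raw list each step, then takes that list's max) by one
-- downward scan from max-1 over a set built once, returning the first missing value.

-- ===== PORT A =====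
-- max(lst1) raises ValueError on []; Pre_ excludes that input, the port defaults to 0 there.
-- rezlst.append(k) is modelled by consing onto a reversed accumulator (O(1), like Python's
-- amortised append) which is reversed back before the final max; same list, same values.
def max_missing_positive (lst1 : List Int) : Int :=
  let m : Int := (PySem.List.max? lst1 (fun x => x)).getD 0
  let st := (PySem.List.pyRange 0 m 1).foldl
    (fun (s : List Int × Int) _ =>
      if s.2 ∈ lst1 then (s.1, s.2 + 1)
      else if s.2 ∉ lst1 ∧ s.2 > 0 ∧ s.2 < m then (s.2 :: s.1, s.2 + 1)
      else s) ([], 1)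
  let rezlst := if st.1.length = 0 then st.1.reverse ++ [m + 1] else st.1.reverse
  (PySem.List.max? rezlst (fun x => x)).getD 0

-- ===== PORT B =====
-- the 'for k in range(m-1, 0, -1): if k not in present: return k' loop with its early return
def altFind (present : PySem.Set Int) : List Int → Int → Int
  | [], d => d
  | k :: ks, d => if PySem.Set.contains present k then altFind present ks d else k

def max_missing_positive_alt (lst1 : List Int) : Int :=
  let m : Int := (PySem.List.max? lst1 (fun x => x)).getD 0
  let present := PySem.Set.ofList lst1
  altFind present (PySem.List.pyRange (m - 1) 0 (-1)) (m + 1)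

-- ===== PRECONDITION & SPEC =====
-- max([]) raises ValueError in both A and B; the empty list is the only excluded input
def Pre_max_missing_positive (lst1 : List Int) : Prop := lst1 ≠ []
instance (lst1 : List Int) : Decidable (Pre_max_missing_positive lst1) := by unfold Pre_max_missing_positive; infer_instance
def pvWitness_max_missing_positive : List Int := [3, 1]

def Spec_max_missing_positive (lst1 : List Int) (out : Int) : Prop := out = max_missing_positive_alt lst1
instance (lst1 : List Int) (out : Int) : Decidable (Spec_max_missing_positive lst1 out) := by unfold Spec_max_missing_positive; infer_instance

-- ===== CLAIM (what is proved, stated in full; the proofs are below) =====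
def Claim_equal_max_missing_positive : Prop := ∀ (lst1 : List Int), Dom_max_missing_positive lst1 → Pre_max_missing_positive lst1 → Spec_max_missing_positive lst1 (max_missing_positive lst1)

-- ===== LEMMAS AND PROOFS =====

-- A's loop invariant: while every step starts below m (and k ≥ 1), each iteration advances k
-- by one and appends k exactly when k is missing from lst1.
theorem loopA_inv (lst1 : List Int) (m : Int) :
    ∀ (l : List Int) (rez : List Int) (k : Int), 1 ≤ k → k + l.length ≤ m →
      l.foldl (fun (s : List Int × Int) _ =>
        if s.2 ∈ lst1 then (s.1, s.2 + 1)
        else if s.2 ∉ lst1 ∧ s.2 > 0 ∧ s.2 < m then (s.2 :: s.1, s.2 + 1)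
        else s) (rez, k)
      = (((PySem.List.pyRange k (k + l.length) 1).filter (fun t => decide (t ∉ lst1))).reverse
          ++ rez,
         k + l.length) := by
  intro l
  induction l with
  | nil =>
    intro rez k hk hm
    simp [PySem.List.pyRange_one_eq_nil (by omega : (k:Int) ≤ k)]
  | cons x xs ih =>
    intro rez k hk hm
    have hcast : (((xs.length + 1 : Nat)) : Int) = (xs.length : Int) + 1 := by push_cast; ring
    simp only [List.length_cons, hcast] at hm ⊢
    have hkm : k < m := by omega
    have hrange : PySem.List.pyRange k (k + ((xs.length : Int) + 1)) 1
        = k :: PySem.List.pyRange (k + 1) (k + ((xs.length : Int) + 1)) 1 :=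
      PySem.List.pyRange_one_cons (by omega)
    have harg : k + ((xs.length : Int) + 1) = (k + 1) + (xs.length : Int) := by ring
    simp only [List.foldl_cons]
    by_cases hx : k ∈ lst1
    · rw [if_pos hx, ih rez (k+1) (by omega) (by omega), hrange, harg]
      simp [hx]
    · rw [if_neg hx, if_pos (show k ∉ lst1 ∧ k > 0 ∧ k < m from ⟨hx, by omega, hkm⟩),
          ih (k :: rez) (k+1) (by omega) (by omega), hrange, harg]
      simp [hx]

-- B's loop returns the first element of the range absent from lst1, else the default.
theorem altFind_eq (lst1 : List Int) :
    ∀ (l : List Int) (d : Int),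
      altFind (PySem.Set.ofList lst1) l d
        = ((l.filter (fun t => decide (t ∉ lst1))).head?).getD d := by
  intro l
  induction l with
  | nil => intro d; simp [altFind]
  | cons x xs ih =>
    intro d
    by_cases hx : x ∈ lst1
    · simp [altFind, hx, ih]
    · simp [altFind, hx]

-- for a strictly increasing list, Python's max is its last element
theorem max_of_pairwise_lt (l : List Int) (hl : l ≠ []) (hp : l.Pairwise (· < ·)) :
    (PySem.List.max? l (fun x => x)).getD 0 = (l.getLast?).getD 0 := by
  obtain ⟨v, hv⟩ : ∃ v, PySem.List.max? l (fun x => x) = some v := by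
    cases h : PySem.List.max? l (fun x => x) with
    | none => exact absurd ((PySem.List.max?_eq_none_iff l (fun x => x)).mp h) hl
    | some v => exact ⟨v, rfl⟩
  obtain ⟨g, hg⟩ : ∃ g, l.getLast? = some g := by
    cases h : l.getLast? with
    | none => exact absurd (List.getLast?_eq_none_iff.mp h) hl
    | some g => exact ⟨g, rfl⟩
  have hvm : v ∈ l := PySem.List.max?_mem hv
  have hmax : ∀ y ∈ l, y ≤ v := fun y hy => PySem.List.max?_isMax hv y hy
  have hglast : ∀ y ∈ l, y ≤ g := by
    rcases (List.getLast?_eq_some_iff).mp hg with ⟨l', rfl⟩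
    have hpa := (List.pairwise_append.mp hp).2.2
    intro y hy
    rcases List.mem_append.mp hy with h1 | h1
    · exact le_of_lt (hpa y h1 g (by simp))
    · simp at h1; omega
  rw [hv, hg]
  simp only [Option.getD_some]
  exact le_antisymm (hglast v hvm) (hmax g (List.mem_of_getLast? hg))

theorem max_missing_positive_spec : Claim_equal_max_missing_positive := by
  intro lst1 _ hpre
  unfold Spec_max_missing_positive max_missing_positive max_missing_positive_alt
  obtain ⟨m, hm⟩ : ∃ m, PySem.List.max? lst1 (fun x => x) = some m := by
    cases h : PySem.List.max? lst1 (fun x => x) with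
    | none => exact absurd ((PySem.List.max?_eq_none_iff lst1 (fun x => x)).mp h) hpre
    | some m => exact ⟨m, rfl⟩
  simp only [hm, Option.getD_some]
  rw [altFind_eq, PySem.List.pyRange_neg_one_eq_reverse]
  have e1 : m - 1 + 1 = m := by ring
  have e0 : (0 : Int) + 1 = 1 := by norm_num
  rw [e1, e0, List.filter_reverse, List.head?_reverse]
  by_cases hm0 : m ≤ 0
  · rw [PySem.List.pyRange_one_eq_nil (by omega : m ≤ (0:Int)),
       PySem.List.pyRange_one_eq_nil (by omega : m ≤ (1:Int))]
    simp [PySem.List.max?]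
  · have hmem : m ∈ lst1 := PySem.List.max?_mem hm
    have hsplit : PySem.List.pyRange 0 m 1
        = PySem.List.pyRange 0 (m - 1) 1 ++ PySem.List.pyRange (m - 1) m 1 :=
      PySem.List.pyRange_one_append 0 (m - 1) m (by omega) (by omega)
    have hsing : PySem.List.pyRange (m - 1) m 1 = [m - 1] := by
      have h := PySem.List.pyRange_one_singleton (m - 1)
      rwa [e1] at h
    have hlen : (((m - 1 - 0).toNat : Nat) : Int) = m - 1 := by omega
    rw [hsplit, hsing, List.foldl_append]
    rw [loopA_inv lst1 m (PySem.List.pyRange 0 (m - 1) 1) [] 1 (by omega)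
        (by rw [PySem.List.length_pyRange_one, hlen]; omega)]
    rw [PySem.List.length_pyRange_one, hlen, (by ring : 1 + (m - 1) = m)]
    simp only [List.foldl_cons, List.foldl_nil, if_pos hmem, List.append_nil,
      List.length_reverse, List.reverse_reverse]
    set F := (PySem.List.pyRange 1 m 1).filter (fun t => decide (t ∉ lst1)) with hF
    have hpF : F.Pairwise (· < ·) := List.Pairwise.filter _ (PySem.List.pairwise_lt_pyRange_one 1 m)
    by_cases hFnil : F = []
    · simp [hFnil, PySem.List.max?]
    · have hFlen : F.length ≠ 0 := fun h => hFnil (List.eq_nil_of_length_eq_zero h)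
      simp only [if_neg hFlen]
      rw [max_of_pairwise_lt F hFnil hpF]
      obtain ⟨g, hg⟩ : ∃ g, F.getLast? = some g := by
        cases h : F.getLast? with
        | none => exact absurd (List.getLast?_eq_none_iff.mp h) hFnil
        | some g => exact ⟨g, rfl⟩
      rw [hg]
      rfl
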